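-- pv_equiv track=rewrite | github.com/Omerfarukatik/turing-makinas- | ödev_turingn_new.py | say_after_element
-- ===== SOURCE A (Python) =====
-- def say_after_element(arr, element, count_element):
--     count = 0
--     found = False
--
--     for i in arr:
--         if found:
--             if i == count_element:
--                 count += 1
--         if i == element:
--             found = True
--
--     return count
--
--
-- #def duzelt(result):
--     """ '$ işaretine kadarolan '1' leri 0'a çevirip
--         daha anlaşılır gözükmesi için yazdım.
--     """
--     i=1
--     while result[i]!='$':
--         result[i]='0'
--         i+=1
--     return result
-- ===== SOURCE B (Python) =====
-- def say_after_element(arr, element, count_element):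
--     if element not in arr:
--         return 0
--     return arr[arr.index(element) + 1:].count(count_element)
-- ===== Notes on version B (the rewrite author's own statement) =====
-- stated objective: idiomatic
-- what changed: Replaces A's single flag-carrying loop by three library primitives: a membership test (return 0 if element is absent), arr.index to locate the first occurrence, and .count on the slice after it -- no explicit loop or running flag at all.
import Mathlib
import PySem

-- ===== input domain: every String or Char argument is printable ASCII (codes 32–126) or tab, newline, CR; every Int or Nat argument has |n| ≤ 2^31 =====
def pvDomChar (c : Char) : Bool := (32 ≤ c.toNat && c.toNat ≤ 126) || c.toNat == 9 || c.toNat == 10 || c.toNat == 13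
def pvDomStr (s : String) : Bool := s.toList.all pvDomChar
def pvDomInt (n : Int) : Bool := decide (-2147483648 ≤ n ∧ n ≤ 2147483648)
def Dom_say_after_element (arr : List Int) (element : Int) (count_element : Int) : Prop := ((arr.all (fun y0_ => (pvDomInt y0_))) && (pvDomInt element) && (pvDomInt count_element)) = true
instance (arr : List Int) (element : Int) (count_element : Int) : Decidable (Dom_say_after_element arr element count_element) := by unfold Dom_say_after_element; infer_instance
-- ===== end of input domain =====

-- B is an idiomatic loop-free rewrite: membership test, then index + slice + count library calls.
-- ===== PORT A =====
def say_after_element (arr : List Int) (element : Int) (count_element : Int) : Int :=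
  (arr.foldl (fun (s : Int × Bool) i =>
      let count := if s.2 && decide (i = count_element) then s.1 + 1 else s.1
      let found := if i = element then true else s.2
      (count, found)) (0, false)).1

-- ===== PORT B =====
-- Source B: 'if element not in arr: return 0; return arr[arr.index(element)+1:].count(count_element)'
def say_after_element_alt (arr : List Int) (element : Int) (count_element : Int) : Int :=
  if element ∉ arr then 0
  else
    match PySem.List.index? arr element with
    | none => 0   -- unreachable: element ∈ arr
    | some i => ((PySem.List.slice arr (some ((i : Int) + 1)) none).count count_element : Int)

-- ===== PRECONDITION & SPEC =====
def Spec_say_after_element (arr : List Int) (element : Int) (count_element : Int) (out : Int) : Prop := out = say_after_element_alt arr element count_element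
instance (arr : List Int) (element : Int) (count_element : Int) (out : Int) : Decidable (Spec_say_after_element arr element count_element out) := by unfold Spec_say_after_element; infer_instance

-- ===== CLAIM =====
def Claim_equal_say_after_element : Prop := ∀ (arr : List Int) (element : Int) (count_element : Int), Dom_say_after_element arr element count_element → Spec_say_after_element arr element count_element (say_after_element arr element count_element)

-- ===== LEMMAS AND PROOFS =====
-- once found, A's remaining fold just counts count_element
theorem foldlA_true (ce el : Int) : ∀ (l : List Int) (c : Int),
    (l.foldl (fun (s : Int × Bool) i =>
      let count := if s.2 && decide (i = ce) then s.1 + 1 else s.1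
      let found := if i = el then true else s.2
      (count, found)) (c, true)).1
    = c + (l.count ce : Int) := by
  intro l
  induction l with
  | nil => intro c; simp
  | cons x xs ih =>
      intro c
      by_cases h : x = ce
      · have h2 := ih (c + 1)
        simp [List.foldl, h] at h2 ⊢
        linarith
      · have h2 := ih c
        simp [List.foldl, h] at h2 ⊢
        linarith

-- B skips a leading non-match
theorem alt_cons_ne (x el ce : Int) (xs : List Int) (h : x ≠ el) :
    say_after_element_alt (x :: xs) el ce = say_after_element_alt xs el ce := by
  unfold say_after_element_alt
  rw [PySem.List.index?_cons_of_ne xs h]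
  cases hidx : PySem.List.index? xs el with
  | none =>
      have hnm : el ∉ xs := (PySem.List.index?_eq_none_iff xs el).1 hidx
      simp [hnm, Ne.symm h]
  | some i =>
      have hm : el ∈ xs := (PySem.List.index?_isSome_iff xs el).1 (by rw [hidx]; rfl)
      have hm2 : el ∈ x :: xs := List.mem_cons_of_mem _ hm
      have e1 : (((i + 1 : Nat) : Int) + 1) = (((i + 2 : Nat) : Int)) := by push_cast; ring
      have e2 : ((i : Int) + 1) = (((i + 1 : Nat) : Int)) := by push_cast; ring
      simp only [hm, hm2, not_true_eq_false, if_false, Option.map_some]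
      rw [e1, e2, PySem.List.slice_from_natCast, PySem.List.slice_from_natCast]
      rfl

theorem main_eq (el ce : Int) : ∀ (arr : List Int),
    say_after_element arr el ce = say_after_element_alt arr el ce := by
  intro arr
  induction arr with
  | nil => rfl
  | cons x xs ih =>
      by_cases h : x = el
      · subst h
        have h2 := foldlA_true ce x xs 0
        unfold say_after_element say_after_element_alt
        rw [PySem.List.index?_cons_self]
        simp [List.foldl, PySem.List.slice_from_one] at h2 ⊢
        linarith
      · rw [alt_cons_ne x el ce xs h, ← ih]
        simp [say_after_element, List.foldl, h]

-- ===== VERDICT =====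
theorem say_after_element_spec : Claim_equal_say_after_element := by
  intro arr el ce _
  unfold Spec_say_after_element
  exact main_eq el ce arr
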